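-- pv_equiv track=rewrite | github.com/schillingderek/codeFights | letterPath.py | letterPath
-- ===== SOURCE A (Python) =====
-- def letterPath(M):
--     if not M: #if the provided map is empty, return ''
--         return ''
--     #find the size of the provided letter map
--     n = len(M)
--     m = len(M[0])
--
--     #recursive path finding algorithm a la https://www.python.org/doc/essays/graphs/
--     def F(G, s, p=[]):
--         p = p + [s] #add current location to path
--         if s not in G: #if there is nowhere to go from current location, return path
--             return [p]
--         P = [] #initialize list of all possible paths
--         e = 0 #initialize a variable to keep track of the length of the current path
--
--         for n in G[s]: #iterate over all "directions" you can go from current letter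
--             if n not in p: #but only if the letter is not already in the path
--                 N = F(G, n, p)
--                 for n in N:
--                     P.append(n)
--             else:
--                 e += 1
--         if e == len(G[s]): #if the path uses all letters, return it as there is no way to make a longer path
--             return [p]
--         return P
--
--     G = {}
--     d = [[0,1],[0,-1],[1,0],[-1,0]]
--
--     #create graph of connected locations - iterate over the full map and find all letter connected
--     #orthogonally to the current location, add to a dictionary (G) that contains the mapped paths
--     for i in range(n):
--         for j in range(m):
--             for k in range(4):
--                 dy,dx = d[k]
--                 if 0 <= i + dy <= n-1 and 0 <= j + dx <= m-1:
--                     if M[i][j] != M[i+dy][j+dx]: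
--                         if (i,j) in G:
--                             G[(i,j)] += [(i+dy,j+dx)]
--                         else:
--                             G[(i,j)] = [(i+dy,j+dx)]
--     h = ''
--     #call function to find all paths from each starting point
--     for i in range(n):
--         for j in range(m):
--             s = (i,j)
--             for p in F(G, s):
--                 s = ''.join([M[y][x] for y,x in p])
--                 if len(s) >= len(h):
--                     if s > h:
--                         h = s
--     return h
-- ===== SOURCE B (Python) =====
-- def letterPath(M):
--     if not M:
--         return ''
--     n, m = len(M), len(M[0])
--
--     def nbrs(i, j):
--         out = []
--         for dy, dx in ((0, 1), (0, -1), (1, 0), (-1, 0)):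
--             y, x = i + dy, j + dx
--             if 0 <= y < n and 0 <= x < m and M[i][j] != M[y][x]:
--                 out.append((y, x))
--         return out
--
--     def dfs(cell, path, cur, best):
--         path = path + [cell]
--         cur = cur + M[cell[0]][cell[1]]
--         nxt = [t for t in nbrs(*cell) if t not in path]
--         if not nxt:
--             return cur if len(cur) >= len(best) and cur > best else best
--         for t in nxt:
--             best = dfs(t, path, cur, best)
--         return best
--
--     best = ''
--     for i in range(n):
--         for j in range(m):
--             best = dfs((i, j), [], '', best)
--     return best
-- ===== Notes on version B (the rewrite author's own statement) =====
-- stated objective: alternative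
-- what changed: A builds an adjacency dict, recursively materialises the list of ALL complete simple paths as coordinate lists, then joins and scans them for the best string; B computes neighbours on demand from the grid (no dict) and threads the best string through a single DFS, building each candidate string incrementally, so no path list is ever materialised.
import Mathlib
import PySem

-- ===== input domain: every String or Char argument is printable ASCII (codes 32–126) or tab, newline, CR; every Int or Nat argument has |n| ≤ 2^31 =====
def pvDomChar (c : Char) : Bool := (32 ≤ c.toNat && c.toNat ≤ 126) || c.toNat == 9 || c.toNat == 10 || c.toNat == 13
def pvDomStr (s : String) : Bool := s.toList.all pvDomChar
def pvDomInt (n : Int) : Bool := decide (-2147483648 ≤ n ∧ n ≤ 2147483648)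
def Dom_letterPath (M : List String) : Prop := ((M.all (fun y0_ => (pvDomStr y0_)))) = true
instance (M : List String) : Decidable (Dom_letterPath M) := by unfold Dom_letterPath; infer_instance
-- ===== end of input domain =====

-- B replaces A's three-phase algorithm (build adjacency dict, recursively collect ALL complete
-- paths as coordinate lists, then join and scan them for the best string) by a single DFS that
-- computes neighbours on demand from the grid and threads the best string through the recursion,
-- building the candidate string incrementally; objective: alternative (no path list materialised).

-- ---- shared small helpers (the grid, a character lookup, the update rule both Pythons share) ----
def pvGrid (M : List String) : List (List Char) := M.map String.toList

def pvCh (g : List (List Char)) (i j : Int) : Char :=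
  PySem.List.pyGetD (PySem.List.pyGetD g i []) j ' '

-- Python: `if len(s) >= len(h): if s > h: h = s`  (string > is code-point lexicographic = < on List Char)
def pvUpd (h s : List Char) : List Char := if h.length ≤ s.length ∧ h < s then s else h

def pvDirs : List (Int × Int) := [(0, 1), (0, -1), (1, 0), (-1, 0)]

-- the nested `for i in range(n): for j in range(m)` traversal order, shared by both Pythons
def pvCells (n m : Int) : List (Int × Int) :=
  (PySem.List.pyRange 0 n 1).flatMap (fun i => (PySem.List.pyRange 0 m 1).map (fun j => (i, j)))

-- termination measure for both recursions: number of grid cells not yet on the path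
def pvMu (cells p : List (Int × Int)) : Nat :=
  (cells.filter (fun c => decide (¬ c ∈ p))).length

theorem pvMu_append_lt (cells p : List (Int × Int)) (s : Int × Int)
    (h1 : s ∈ cells) (h2 : ¬ s ∈ p) : pvMu cells (p ++ [s]) < pvMu cells p := by
  have hsplit : cells.filter (fun c => decide (¬ c ∈ p ++ [s]))
      = (cells.filter (fun c => decide (¬ c ∈ p))).filter (fun c => decide (¬ c ∈ [s])) := by
    rw [List.filter_filter]
    apply List.filter_congr
    intro c _
    simp [List.mem_append, not_or, Bool.and_comm]
  unfold pvMu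
  rw [hsplit]
  simp only [List.length_filter_lt_length_iff_exists]
  exact ⟨s, List.mem_filter.2 ⟨h1, by simp [h2]⟩, by simp⟩

-- ===== PORT A =====
-- one step of A's graph-building loops: the `for k in range(4)` body at cell c
def pvStepG (g : List (List Char)) (n m : Int)
    (G : PySem.Dict (Int × Int) (List (Int × Int))) (c : Int × Int) :
    PySem.Dict (Int × Int) (List (Int × Int)) :=
  pvDirs.foldl (fun G d =>
    if 0 ≤ c.1 + d.1 ∧ c.1 + d.1 ≤ n - 1 ∧ 0 ≤ c.2 + d.2 ∧ c.2 + d.2 ≤ m - 1 ∧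
        pvCh g c.1 c.2 ≠ pvCh g (c.1 + d.1) (c.2 + d.2) then
      (if (PySem.Dict.get? G c).isSome then
        PySem.Dict.insert G c (PySem.Dict.getD G c [] ++ [(c.1 + d.1, c.2 + d.2)])
      else PySem.Dict.insert G c [(c.1 + d.1, c.2 + d.2)])
    else G) G

def pvBuildG (g : List (List Char)) (n m : Int) : PySem.Dict (Int × Int) (List (Int × Int)) :=
  (pvCells n m).foldl (pvStepG g n m) PySem.Dict.empty

-- A's recursive F: returns all complete simple paths from s extending p (cells is a totality
-- guard universe only; the guard branch is never reached from letterPath's own calls)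
def pvF (cells : List (Int × Int)) (G : PySem.Dict (Int × Int) (List (Int × Int)))
    (s : Int × Int) (p : List (Int × Int)) : List (List (Int × Int)) :=
  let p' := p ++ [s]
  if hs : s ∈ p ∨ ¬ s ∈ cells then [p'] else
  match PySem.Dict.get? G s with
  | none => [p']
  | some ns =>
    let e := (ns.filter (fun t => decide (t ∈ p'))).length
    if e = ns.length then [p']
    else (ns.filter (fun t => decide (¬ t ∈ p'))).flatMap (fun t => pvF cells G t p')
termination_by pvMu cells p
decreasing_by
  exact pvMu_append_lt cells p s (by tauto) (by tauto)

def letterPath (M : List String) : String :=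
  if M = [] then "" else
  let g := pvGrid M
  let n : Int := (M.length : Int)
  let m : Int := ((PySem.List.pyGetD g 0 []).length : Int)
  let G := pvBuildG g n m
  let cells := pvCells n m
  String.ofList (cells.foldl (fun h c =>
    (pvF cells G c []).foldl (fun h p => pvUpd h (p.map (fun yx => pvCh g yx.1 yx.2))) h) [])

-- ===== PORT B =====
-- neighbours computed on demand from the grid (B has no adjacency dict)
def pvNbrs (g : List (List Char)) (n m : Int) (i j : Int) : List (Int × Int) :=
  pvDirs.foldl (fun out d =>
    if 0 ≤ i + d.1 ∧ i + d.1 < n ∧ 0 ≤ j + d.2 ∧ j + d.2 < m ∧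
        pvCh g i j ≠ pvCh g (i + d.1) (j + d.2) then out ++ [(i + d.1, j + d.2)]
    else out) []

-- B's dfs: threads the best string through the traversal, builds the candidate incrementally
def pvDfs (cells : List (Int × Int)) (g : List (List Char)) (n m : Int)
    (s : Int × Int) (p : List (Int × Int)) (cur best : List Char) : List Char :=
  let p' := p ++ [s]
  let cur' := cur ++ [pvCh g s.1 s.2]
  if hs : s ∈ p ∨ ¬ s ∈ cells then pvUpd best cur' else
  let nxt := (pvNbrs g n m s.1 s.2).filter (fun t => decide (¬ t ∈ p'))
  if nxt = [] then pvUpd best cur'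
  else nxt.foldl (fun b t => pvDfs cells g n m t p' cur' b) best
termination_by pvMu cells p
decreasing_by
  exact pvMu_append_lt cells p s (by tauto) (by tauto)

def letterPath_alt (M : List String) : String :=
  if M = [] then "" else
  let g := pvGrid M
  let n : Int := (M.length : Int)
  let m : Int := ((PySem.List.pyGetD g 0 []).length : Int)
  let cells := pvCells n m
  String.ofList (cells.foldl (fun b c => pvDfs cells g n m c [] [] b) [])

-- ===== PRECONDITION & SPEC =====
-- Pre_ excludes ragged maps whose first row is longer than some later row: there Python A
-- (and B) raises IndexError on M[i][j].
def Pre_letterPath (M : List String) : Prop :=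
  ∀ r ∈ M, PySem.Str.len (M.headD "") ≤ PySem.Str.len r
instance (M : List String) : Decidable (Pre_letterPath M) := by unfold Pre_letterPath; infer_instance

def pvWitness_letterPath : List String := ["ab", "ba"]

def Spec_letterPath (M : List String) (out : String) : Prop := out = letterPath_alt M
instance (M : List String) (out : String) : Decidable (Spec_letterPath M out) := by unfold Spec_letterPath; infer_instance

-- ===== CLAIM (what is proved, stated in full; the proofs are below) =====
def Claim_equal_letterPath : Prop := ∀ (M : List String), Dom_letterPath M → Pre_letterPath M → Spec_letterPath M (letterPath M)

-- ===== LEMMAS AND PROOFS =====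

-- step over an arbitrary direction list: A's conditional dict-append loop computes, at key c,
-- exactly B's conditional list-append loop
theorem pv_step_nbrs (ds : List (Int × Int)) (P Q : (Int × Int) → Prop)
    [DecidablePred P] [DecidablePred Q] (hPQ : ∀ d, P d ↔ Q d)
    (f : (Int × Int) → (Int × Int)) (c : Int × Int)
    (G : PySem.Dict (Int × Int) (List (Int × Int))) (acc : List (Int × Int))
    (hacc : PySem.Dict.get? G c = if acc = [] then none else some acc) :
    PySem.Dict.get? (ds.foldl (fun G d =>
      if P d then
        (if (PySem.Dict.get? G c).isSome then
          PySem.Dict.insert G c (PySem.Dict.getD G c [] ++ [f d])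
        else PySem.Dict.insert G c [f d])
      else G) G) c
    = (if ds.foldl (fun out d => if Q d then out ++ [f d] else out) acc = [] then none
       else some (ds.foldl (fun out d => if Q d then out ++ [f d] else out) acc)) := by
  induction ds generalizing G acc with
  | nil => simpa using hacc
  | cons d ds ih =>
    simp only [List.foldl_cons]
    by_cases hq : Q d
    · have hp : P d := (hPQ d).2 hq
      rw [if_pos hp, if_pos hq]
      by_cases hacc0 : acc = []
      · subst hacc0
        rw [if_pos rfl] at hacc
        rw [hacc]
        simp only [Option.isSome_none, Bool.false_eq_true, if_false, List.nil_append]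
        exact ih _ _ (by rw [PySem.Dict.get?_insert_self]; simp)
      · rw [if_neg hacc0] at hacc
        rw [hacc]
        simp only [Option.isSome_some, if_true]
        have hgd : PySem.Dict.getD G c [] = acc := PySem.Dict.getD_of_get?_eq_some _ _ hacc
        rw [hgd]
        exact ih _ _ (by rw [PySem.Dict.get?_insert_self]; simp)
    · have hp : ¬ P d := fun h => hq ((hPQ d).1 h)
      rw [if_neg hp, if_neg hq]
      exact ih _ _ hacc

-- the step loop touches no key other than c
theorem pv_step_ne (ds : List (Int × Int)) (P : (Int × Int) → Prop) [DecidablePred P]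
    (f : (Int × Int) → (Int × Int)) (c t : Int × Int) (hne : t ≠ c)
    (G : PySem.Dict (Int × Int) (List (Int × Int))) :
    PySem.Dict.get? (ds.foldl (fun G d =>
      if P d then
        (if (PySem.Dict.get? G c).isSome then
          PySem.Dict.insert G c (PySem.Dict.getD G c [] ++ [f d])
        else PySem.Dict.insert G c [f d])
      else G) G) t = PySem.Dict.get? G t := by
  induction ds generalizing G with
  | nil => rfl
  | cons d ds ih =>
    simp only [List.foldl_cons]
    rw [ih]
    split_ifs with h1 h2
    · exact PySem.Dict.get?_insert_of_ne _ _ hne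
    · exact PySem.Dict.get?_insert_of_ne _ _ hne
    · rfl

theorem pvStepG_get?_self (g : List (List Char)) (n m : Int) (c : Int × Int)
    (G : PySem.Dict (Int × Int) (List (Int × Int)))
    (h0 : PySem.Dict.get? G c = none) :
    PySem.Dict.get? (pvStepG g n m G c) c
    = (if pvNbrs g n m c.1 c.2 = [] then none else some (pvNbrs g n m c.1 c.2)) := by
  have h := pv_step_nbrs pvDirs
    (fun d => 0 ≤ c.1 + d.1 ∧ c.1 + d.1 ≤ n - 1 ∧ 0 ≤ c.2 + d.2 ∧ c.2 + d.2 ≤ m - 1 ∧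
      pvCh g c.1 c.2 ≠ pvCh g (c.1 + d.1) (c.2 + d.2))
    (fun d => 0 ≤ c.1 + d.1 ∧ c.1 + d.1 < n ∧ 0 ≤ c.2 + d.2 ∧ c.2 + d.2 < m ∧
      pvCh g c.1 c.2 ≠ pvCh g (c.1 + d.1) (c.2 + d.2))
    (fun d => by
      constructor <;> rintro ⟨a, b, c', d', e⟩ <;> exact ⟨a, by omega, c', by omega, e⟩)
    (fun d => (c.1 + d.1, c.2 + d.2)) c G [] (by simpa using h0)
  exact h

theorem pvStepG_get?_ne (g : List (List Char)) (n m : Int) (c t : Int × Int) (hne : t ≠ c)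
    (G : PySem.Dict (Int × Int) (List (Int × Int))) :
    PySem.Dict.get? (pvStepG g n m G c) t = PySem.Dict.get? G t := by
  exact pv_step_ne pvDirs
    (fun d => 0 ≤ c.1 + d.1 ∧ c.1 + d.1 ≤ n - 1 ∧ 0 ≤ c.2 + d.2 ∧ c.2 + d.2 ≤ m - 1 ∧
      pvCh g c.1 c.2 ≠ pvCh g (c.1 + d.1) (c.2 + d.2))
    (fun d => (c.1 + d.1, c.2 + d.2)) c t hne G

theorem pvCells_nodup (n m : Int) : (pvCells n m).Nodup := by
  unfold pvCells
  rw [List.nodup_flatMap]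
  constructor
  · intro i _
    exact (PySem.List.nodup_pyRange_one 0 m).map (fun a b h => (Prod.ext_iff.1 h).2)
  · exact (PySem.List.nodup_pyRange_one 0 n).imp (fun {a b} hne x hx1 hx2 => by
      simp only [List.mem_map] at hx1 hx2
      obtain ⟨j1, _, rfl⟩ := hx1
      obtain ⟨j2, _, h⟩ := hx2
      exact hne ((Prod.ext_iff.1 h).1.symm))

theorem pvBuildG_fold_get? (g : List (List Char)) (n m : Int) :
    ∀ (cs : List (Int × Int)) (G0 : PySem.Dict (Int × Int) (List (Int × Int))) (s : Int × Int),
      cs.Nodup → (∀ c ∈ cs, PySem.Dict.get? G0 c = none) →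
      PySem.Dict.get? (cs.foldl (pvStepG g n m) G0) s
      = if s ∈ cs then
          (if pvNbrs g n m s.1 s.2 = [] then none else some (pvNbrs g n m s.1 s.2))
        else PySem.Dict.get? G0 s := by
  intro cs
  induction cs with
  | nil => intro G0 s _ _; simp
  | cons c cs ih =>
    intro G0 s hnd h0
    simp only [List.foldl_cons]
    have hnd' : cs.Nodup := (List.nodup_cons.1 hnd).2
    have hcn : ¬ c ∈ cs := (List.nodup_cons.1 hnd).1
    have h0' : ∀ c' ∈ cs, PySem.Dict.get? (pvStepG g n m G0 c) c' = none := by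
      intro c' hc'
      rw [pvStepG_get?_ne g n m c c' (fun he => hcn (he ▸ hc')) G0]
      exact h0 c' (List.mem_cons_of_mem _ hc')
    rw [ih _ s hnd' h0']
    by_cases hs : s ∈ cs
    · simp [hs]
    · rw [if_neg hs]
      by_cases hsc : s = c
      · subst hsc
        rw [pvStepG_get?_self g n m s G0 (h0 s (List.mem_cons_self ..))]
        simp
      · rw [pvStepG_get?_ne g n m c s hsc G0]
        have : ¬ s ∈ c :: cs := by simp [hsc, hs]
        rw [if_neg this]

theorem pvBuildG_get? (g : List (List Char)) (n m : Int) (s : Int × Int) (hs : s ∈ pvCells n m) :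
    PySem.Dict.get? (pvBuildG g n m) s
    = (if pvNbrs g n m s.1 s.2 = [] then none else some (pvNbrs g n m s.1 s.2)) := by
  unfold pvBuildG
  rw [pvBuildG_fold_get? g n m (pvCells n m) PySem.Dict.empty s (pvCells_nodup n m)
    (fun c _ => PySem.Dict.get?_empty ..)]
  rw [if_pos hs]

-- the central lemma: B's accumulator dfs computes A's "collect all complete paths, then fold
-- the update rule over their strings"
theorem pvDfs_eq_foldF (g : List (List Char)) (n m : Int) (cells : List (Int × Int))
    (G : PySem.Dict (Int × Int) (List (Int × Int)))
    (hG : ∀ s ∈ cells, PySem.Dict.get? G s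
        = (if pvNbrs g n m s.1 s.2 = [] then none else some (pvNbrs g n m s.1 s.2))) :
    ∀ (k : Nat) (s : Int × Int) (p : List (Int × Int)) (best : List Char),
      pvMu cells p ≤ k →
      pvDfs cells g n m s p (p.map (fun c => pvCh g c.1 c.2)) best
      = (pvF cells G s p).foldl (fun h q => pvUpd h (q.map (fun yx => pvCh g yx.1 yx.2))) best := by
  intro k
  induction k with
  | zero =>
    intro s p best hk
    rw [pvDfs, pvF]
    by_cases hg : s ∈ p ∨ ¬ s ∈ cells
    · simp [hg, List.map_append]
    · exfalso
      push_neg at hg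
      have h1 : 0 < pvMu cells p :=
        List.length_pos_of_mem (List.mem_filter.2 ⟨hg.2, by simp [hg.1]⟩)
      omega
  | succ k ih =>
    intro s p best hk
    rw [pvDfs, pvF]
    by_cases hg : s ∈ p ∨ ¬ s ∈ cells
    · simp [hg, List.map_append]
    · simp only [dif_neg hg]
      push_neg at hg
      obtain ⟨hsp, hsc⟩ := hg
      rw [hG s hsc]
      by_cases hnil : pvNbrs g n m s.1 s.2 = []
      · rw [if_pos hnil]
        simp [hnil, List.map_append]
      · rw [if_neg hnil]
        dsimp only
        by_cases hall : (pvNbrs g n m s.1 s.2).filter (fun t => decide (¬ t ∈ p ++ [s])) = []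
        · have hmem : ∀ t ∈ pvNbrs g n m s.1 s.2, t ∈ p ++ [s] := by
            intro t ht
            by_contra hc
            have : t ∈ (pvNbrs g n m s.1 s.2).filter (fun t => decide (¬ t ∈ p ++ [s])) :=
              List.mem_filter.2 ⟨ht, by simp [hc]⟩
            rw [hall] at this
            cases this
          have he : ((pvNbrs g n m s.1 s.2).filter (fun t => decide (t ∈ p ++ [s]))).length
              = (pvNbrs g n m s.1 s.2).length := by
            rw [List.filter_eq_self.2 (fun t ht => by simp [hmem t ht])]
          rw [if_pos hall, if_pos he]
          simp [List.map_append]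
        · have hlt : ((pvNbrs g n m s.1 s.2).filter (fun t => decide (t ∈ p ++ [s]))).length
              < (pvNbrs g n m s.1 s.2).length := by
            obtain ⟨t, ht⟩ := List.exists_mem_of_ne_nil _ hall
            have htm := (List.mem_filter.1 ht).1
            have htp : ¬ t ∈ p ++ [s] := by simpa using (List.mem_filter.1 ht).2
            simp only [List.length_filter_lt_length_iff_exists]
            exact ⟨t, htm, by simp [htp]⟩
          have hne : ¬ ((pvNbrs g n m s.1 s.2).filter (fun t => decide (t ∈ p ++ [s]))).length
              = (pvNbrs g n m s.1 s.2).length := Nat.ne_of_lt hlt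
          simp only [if_neg hall, if_neg hne]
          have hmu : pvMu cells (p ++ [s]) ≤ k :=
            Nat.lt_succ_iff.1 (lt_of_lt_of_le (pvMu_append_lt cells p s hsc hsp) hk)
          have hcur : (p.map (fun c => pvCh g c.1 c.2)) ++ [pvCh g s.1 s.2]
              = (p ++ [s]).map (fun c => pvCh g c.1 c.2) := by simp
          rw [hcur]
          generalize (pvNbrs g n m s.1 s.2).filter (fun t => decide (¬ t ∈ p ++ [s])) = l
          induction l generalizing best with
          | nil => simp
          | cons t l ihl =>
            simp only [List.foldl_cons, List.flatMap_cons, List.foldl_append]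
            rw [ih t (p ++ [s]) best hmu]
            exact ihl _
  

-- ===== VERDICT (by name: the statement is the Claim_ definition above) =====
theorem letterPath_spec : Claim_equal_letterPath := by
  intro M _ _
  unfold Spec_letterPath letterPath letterPath_alt
  by_cases hM : M = []
  · simp [hM]
  · rw [if_neg hM, if_neg hM]
    dsimp only
    congr 1
    apply PySem.List.foldl_congr_mem
    intro acc c hc
    have hG : ∀ s ∈ pvCells (M.length : Int) ((PySem.List.pyGetD (pvGrid M) 0 []).length : Int),
        PySem.Dict.get? (pvBuildG (pvGrid M) (M.length : Int)
          ((PySem.List.pyGetD (pvGrid M) 0 []).length : Int)) s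
        = (if pvNbrs (pvGrid M) (M.length : Int)
              ((PySem.List.pyGetD (pvGrid M) 0 []).length : Int) s.1 s.2 = [] then none
           else some (pvNbrs (pvGrid M) (M.length : Int)
              ((PySem.List.pyGetD (pvGrid M) 0 []).length : Int) s.1 s.2)) :=
      fun s hs => pvBuildG_get? _ _ _ s hs
    have h := pvDfs_eq_foldF (pvGrid M) (M.length : Int)
      ((PySem.List.pyGetD (pvGrid M) 0 []).length : Int)
      (pvCells (M.length : Int) ((PySem.List.pyGetD (pvGrid M) 0 []).length : Int))
      _ hG (pvMu (pvCells (M.length : Int) ((PySem.List.pyGetD (pvGrid M) 0 []).length : Int)) [])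
      c [] acc (le_refl _)
    simpa using h.symm
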